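-- pv_equiv track=rewrite | github.com/sofiamrfernandess/ATP2022 | TPC5/ATP_TPC5.py | disteta
-- ===== SOURCE A (Python) =====
-- def disteta(list):
--     distrib=[]
--     e=30
--     while e<85:
--         escalão=[e,e+5]
--         n=0
--         for p in list:
--             if p[-1]=="1" and escalão[0]<=int(p[0])<escalão[1]:
--                 n+=1
--         distrib.append((escalão,n))
--         e+=5
--     return distrib
-- ===== SOURCE B (Python) =====
-- def disteta(list):
--     counts = [0] * 11
--     for p in list:
--         if p[-1] == "1":
--             age = int(p[0])
--             if 30 <= age < 85:
--                 counts[(age - 30) // 5] += 1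
--     return [([e, e + 5], counts[i]) for i, e in enumerate(range(30, 85, 5))]
-- ===== Notes on version B (the rewrite author's own statement) =====
-- stated objective: alternative
-- what changed: Replaces A's 11 separate scans of the records (one per 5-year band) by a single pass that buckets each flagged in-range record into counts[(age-30)//5], then emits the band list from the counters.
import Mathlib
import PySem

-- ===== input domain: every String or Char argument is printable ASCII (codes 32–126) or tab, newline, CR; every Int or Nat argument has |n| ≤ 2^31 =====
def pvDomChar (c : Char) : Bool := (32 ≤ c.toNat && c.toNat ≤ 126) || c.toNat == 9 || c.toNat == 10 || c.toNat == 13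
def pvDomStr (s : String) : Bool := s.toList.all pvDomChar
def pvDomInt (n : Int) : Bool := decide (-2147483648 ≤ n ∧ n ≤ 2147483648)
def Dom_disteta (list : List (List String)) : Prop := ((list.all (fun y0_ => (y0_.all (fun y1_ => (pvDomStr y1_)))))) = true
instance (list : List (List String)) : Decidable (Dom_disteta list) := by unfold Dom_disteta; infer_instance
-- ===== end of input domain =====

-- B replaces A's 11 full scans of the records (one per age band) by a single pass that
-- buckets each flagged record into counts[(age-30)//5]; objective: alternative algorithm.

-- ===== PORT A =====
def disteta (list : List (List String)) : List (List Int × Int) :=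
  (PySem.List.pyRange 30 85 5).foldl
    (fun distrib e =>
      distrib ++ [([e, e + 5],
        list.foldl
          (fun n p =>
            if PySem.List.pyGetD p (-1) "" = "1" ∧
               PySem.List.pyGetD [e, e + 5] 0 0 ≤ (PySem.Int.ofStr? (PySem.List.pyGetD p 0 "")).getD 0 ∧
               (PySem.Int.ofStr? (PySem.List.pyGetD p 0 "")).getD 0 < PySem.List.pyGetD [e, e + 5] 1 0
            then n + 1 else n) (0 : Int))]) []

-- ===== PORT B =====
-- age = int(p[0])  (total form; Pre_ guarantees ofStr? succeeds whenever the flag fires)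
def pvAge (p : List String) : Int := (PySem.Int.ofStr? (PySem.List.pyGetD p 0 "")).getD 0

def disteta_alt (list : List (List String)) : List (List Int × Int) :=
  (PySem.List.enumerate (PySem.List.pyRange 30 85 5) 0).map
    (fun ie => ([ie.2, ie.2 + 5],
      PySem.List.pyGetD
        (list.foldl
          (fun counts p =>
            if PySem.List.pyGetD p (-1) "" = "1" then
              if 30 ≤ pvAge p ∧ pvAge p < 85 then
                PySem.List.pySetD counts (PySem.Int.floordiv (pvAge p - 30) 5)
                  (PySem.List.pyGetD counts (PySem.Int.floordiv (pvAge p - 30) 5) 0 + 1)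
              else counts
            else counts)
          (List.replicate 11 (0 : Int)))
        ie.1 0))

-- ===== PRECONDITION & SPEC =====
-- Pre_ excludes exactly the inputs where Python A raises: a record that is the empty list
-- (p[-1] -> IndexError) or a record flagged "1" whose first field is not int-parsable
-- (int(p[0]) -> ValueError).
def Pre_disteta (list : List (List String)) : Prop :=
  ∀ p ∈ list, p ≠ [] ∧
    (PySem.List.pyGetD p (-1) "" = "1" →
      (PySem.Int.ofStr? (PySem.List.pyGetD p 0 "")).isSome = true)
instance (list : List (List String)) : Decidable (Pre_disteta list) := by unfold Pre_disteta; infer_instance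

def pvWitness_disteta : List (List String) := [["31", "1"], ["90", "0"], ["x", "0"], ["84", "1"]]

def Spec_disteta (list : List (List String)) (out : List (List Int × Int)) : Prop := out = disteta_alt list
instance (list : List (List String)) (out : List (List Int × Int)) : Decidable (Spec_disteta list out) := by unfold Spec_disteta; infer_instance

-- ===== CLAIM (what is proved, stated in full; the proofs are below) =====
def Claim_equal_disteta : Prop := ∀ (list : List (List String)), Dom_disteta list → Pre_disteta list → Spec_disteta list (disteta list)

-- ===== LEMMAS AND PROOFS =====

-- reference count of flagged records with age in [e, e+5)
def pvCnt (e : Int) : List (List String) → Int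
  | [] => 0
  | p :: t =>
      (if PySem.List.pyGetD p (-1) "" = "1" ∧ e ≤ pvAge p ∧ pvAge p < e + 5 then 1 else 0) + pvCnt e t

-- A's inner loop counts pvCnt e
lemma pv_innerA (e : Int) (l : List (List String)) : ∀ (n : Int),
    l.foldl
      (fun n p =>
        if PySem.List.pyGetD p (-1) "" = "1" ∧
           PySem.List.pyGetD [e, e + 5] 0 0 ≤ (PySem.Int.ofStr? (PySem.List.pyGetD p 0 "")).getD 0 ∧
           (PySem.Int.ofStr? (PySem.List.pyGetD p 0 "")).getD 0 < PySem.List.pyGetD [e, e + 5] 1 0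
        then n + 1 else n) n = n + pvCnt e l := by
  induction l with
  | nil => intro n; simp [pvCnt]
  | cons p t ih =>
      intro n
      simp only [List.foldl_cons]
      rw [ih]
      have h1 : PySem.List.pyGetD [e, e + 5] 1 0 = e + 5 := by
        simp [PySem.List.pyGetD_ofNat' [e, e + 5] 1 0]
      simp only [pvCnt, PySem.List.pyGetD_zero_cons, h1, pvAge]
      split_ifs <;> ring

-- one step of B's fold changes bucket i exactly by A's band test for e = 30 + 5*i
lemma pv_stepB (c : List Int) (hc : c.length = 11) (p : List String) (i : Nat) (hi : i < 11) :
    PySem.List.pyGetD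
      (if PySem.List.pyGetD p (-1) "" = "1" then
        if 30 ≤ pvAge p ∧ pvAge p < 85 then
          PySem.List.pySetD c (PySem.Int.floordiv (pvAge p - 30) 5)
            (PySem.List.pyGetD c (PySem.Int.floordiv (pvAge p - 30) 5) 0 + 1)
        else c
      else c) (i : Int) 0
    = PySem.List.pyGetD c (i : Int) 0 +
      (if PySem.List.pyGetD p (-1) "" = "1" ∧ (30 + 5 * (i : Int)) ≤ pvAge p ∧ pvAge p < (30 + 5 * (i : Int)) + 5
       then 1 else 0) := by
  by_cases hf : PySem.List.pyGetD p (-1) "" = "1"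
  · by_cases hr : 30 ≤ pvAge p ∧ pvAge p < 85
    · rw [if_pos hf, if_pos hr]
      set a := pvAge p with ha
      have hj : PySem.Int.floordiv (a - 30) 5 = ((a - 30).toNat / 5 : Nat) := by
        have h0 : (0 : Int) ≤ a - 30 := by omega
        have hcast : a - 30 = ((a - 30).toNat : Int) := by omega
        rw [hcast]
        exact_mod_cast PySem.Int.floordiv_natCast (a - 30).toNat 5
      have hjlt : (a - 30).toNat / 5 < 11 := by omega
      rw [hj, PySem.List.pyGetD_pySetD_natCast c ((a - 30).toNat / 5) i _ 0 (by omega)]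
      by_cases hie : i = (a - 30).toNat / 5
      · have hcond : (30 + 5 * (i : Int)) ≤ a ∧ a < (30 + 5 * (i : Int)) + 5 := by
          constructor <;> omega
        rw [if_pos hie, if_pos ⟨hf, hcond⟩, hie]
      · have hcond : ¬ (PySem.List.pyGetD p (-1) "" = "1" ∧ (30 + 5 * (i : Int)) ≤ a ∧ a < (30 + 5 * (i : Int)) + 5) := by
          rintro ⟨-, h1, h2⟩
          exact hie (by omega)
        rw [if_neg hie, if_neg hcond, add_zero]
    · have hcond : ¬ ((30 + 5 * (i : Int)) ≤ pvAge p ∧ pvAge p < (30 + 5 * (i : Int)) + 5) := by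
        intro h; exact hr (by constructor <;> omega)
      simp [hf, hr, hcond]
  · simp [hf]

-- after B's fold, bucket i holds its start value plus pvCnt (30 + 5*i)
lemma pv_bucketB (l : List (List String)) : ∀ (c : List Int), c.length = 11 →
    ∀ (i : Nat), i < 11 →
    PySem.List.pyGetD
      (l.foldl
        (fun counts p =>
          if PySem.List.pyGetD p (-1) "" = "1" then
            if 30 ≤ pvAge p ∧ pvAge p < 85 then
              PySem.List.pySetD counts (PySem.Int.floordiv (pvAge p - 30) 5)
                (PySem.List.pyGetD counts (PySem.Int.floordiv (pvAge p - 30) 5) 0 + 1)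
            else counts
          else counts) c) (i : Int) 0
    = PySem.List.pyGetD c (i : Int) 0 + pvCnt (30 + 5 * (i : Int)) l := by
  induction l with
  | nil => intro c _ i _; simp [pvCnt]
  | cons p t ih =>
      intro c hc i hi
      simp only [List.foldl_cons]
      have hlen : (if PySem.List.pyGetD p (-1) "" = "1" then
          if 30 ≤ pvAge p ∧ pvAge p < 85 then
            PySem.List.pySetD c (PySem.Int.floordiv (pvAge p - 30) 5)
              (PySem.List.pyGetD c (PySem.Int.floordiv (pvAge p - 30) 5) 0 + 1)
          else c
        else c).length = 11 := by split_ifs <;> simp [PySem.List.length_pySetD, hc]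
      rw [ih _ hlen i hi, pv_stepB c hc p i hi, pvCnt]
      ring

-- 11 band components agree
lemma pv_component (list : List (List String)) (i : Nat) (hi : i < 11) (e : Int)
    (he : e = 30 + 5 * (i : Int)) :
    list.foldl
      (fun n p =>
        if PySem.List.pyGetD p (-1) "" = "1" ∧
           PySem.List.pyGetD [e, e + 5] 0 0 ≤ (PySem.Int.ofStr? (PySem.List.pyGetD p 0 "")).getD 0 ∧
           (PySem.Int.ofStr? (PySem.List.pyGetD p 0 "")).getD 0 < PySem.List.pyGetD [e, e + 5] 1 0
        then n + 1 else n) (0 : Int)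
    = PySem.List.pyGetD
        (list.foldl
          (fun counts p =>
            if PySem.List.pyGetD p (-1) "" = "1" then
              if 30 ≤ pvAge p ∧ pvAge p < 85 then
                PySem.List.pySetD counts (PySem.Int.floordiv (pvAge p - 30) 5)
                  (PySem.List.pyGetD counts (PySem.Int.floordiv (pvAge p - 30) 5) 0 + 1)
              else counts
            else counts)
          (List.replicate 11 (0 : Int))) (i : Int) 0 := by
  rw [pv_innerA, pv_bucketB list (List.replicate 11 0) (by simp) i hi]
  have h0 : PySem.List.pyGetD (List.replicate 11 (0 : Int)) (i : Int) 0 = 0 := by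
    interval_cases i <;> decide
  rw [h0, he]

-- ===== VERDICT (by name: the statement is the Claim_ definition above) =====
theorem disteta_spec : Claim_equal_disteta := by
  intro list _ _
  unfold Spec_disteta disteta disteta_alt
  have h1 : PySem.List.pyRange 30 85 5 = [30, 35, 40, 45, 50, 55, 60, 65, 70, 75, 80] := by decide
  have h2 : PySem.List.enumerate ([30, 35, 40, 45, 50, 55, 60, 65, 70, 75, 80] : List Int) 0 =
      [((0 : Int), (30 : Int)), (1, 35), (2, 40), (3, 45), (4, 50), (5, 55), (6, 60), (7, 65),
       (8, 70), (9, 75), (10, 80)] := by decide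
  rw [h1, h2, PySem.List.foldl_append_singleton_eq_map]
  simp only [List.map, List.nil_append, List.cons.injEq, Prod.mk.injEq, and_true, true_and]
  refine ⟨?_, ?_, ?_, ?_, ?_, ?_, ?_, ?_, ?_, ?_, ?_⟩
  · exact pv_component list 0 (by omega) 30 (by norm_num)
  · exact pv_component list 1 (by omega) 35 (by norm_num)
  · exact pv_component list 2 (by omega) 40 (by norm_num)
  · exact pv_component list 3 (by omega) 45 (by norm_num)
  · exact pv_component list 4 (by omega) 50 (by norm_num)
  · exact pv_component list 5 (by omega) 55 (by norm_num)
  · exact pv_component list 6 (by omega) 60 (by norm_num)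
  · exact pv_component list 7 (by omega) 65 (by norm_num)
  · exact pv_component list 8 (by omega) 70 (by norm_num)
  · exact pv_component list 9 (by omega) 75 (by norm_num)
  · exact pv_component list 10 (by omega) 80 (by norm_num)
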